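-- pv_equiv track=rewrite | github.com/michonchy/display-graph-API | display_graph/app.py | number_display_graph
-- ===== SOURCE A (Python) =====
-- from typing import List
--
-- def number_display_graph(numbers:List[int])->List[str]:
--     if len(numbers) > 5:
--         numbers = numbers[0:5]
--     graph = []
--     for n in numbers:
--         ind_number = str(n)+ "  :"
--         for i in range(n):
--             if i % 5 == 0 and i != 0 :
--                 ind_number += " "
--             ind_number += "*"
--         graph.append(ind_number)
--     return graph
-- ===== SOURCE B (Python) =====
-- from typing import List
--
-- def _bar(n: int) -> str:
--     # star segment for n: full five-star chunks, then the remainder, joined by spaces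
--     parts = []
--     while n > 5:
--         parts.append("*****")
--         n -= 5
--     parts.append("*" * n)
--     return " ".join(parts)
--
-- def number_display_graph(numbers: List[int]) -> List[str]:
--     return [str(n) + "  :" + _bar(n) for n in numbers[:5]]
-- ===== Notes on version B (the rewrite author's own statement) =====
-- stated objective: faster
-- what changed: A appends star-by-star with an inline 'i % 5 == 0 and i != 0' spacing test inside a per-character loop; B builds each bar by peeling off whole five-star chunks and joining the chunks with single spaces, so no per-index modulo branch remains.
import Mathlib
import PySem

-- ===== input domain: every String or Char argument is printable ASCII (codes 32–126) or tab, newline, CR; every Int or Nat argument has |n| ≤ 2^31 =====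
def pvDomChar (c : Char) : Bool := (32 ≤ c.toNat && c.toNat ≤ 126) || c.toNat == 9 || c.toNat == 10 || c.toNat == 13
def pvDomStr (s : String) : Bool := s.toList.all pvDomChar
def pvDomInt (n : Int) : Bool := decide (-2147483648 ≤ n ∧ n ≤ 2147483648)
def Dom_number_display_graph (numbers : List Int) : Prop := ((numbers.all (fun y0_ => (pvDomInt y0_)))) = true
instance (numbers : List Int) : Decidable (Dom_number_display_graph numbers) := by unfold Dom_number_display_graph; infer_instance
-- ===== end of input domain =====

-- B replaces A's per-character loop (with its inline `i % 5 == 0 and i != 0` spacing test)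
-- by chunking: peel off full five-star groups, then join the chunks with single spaces (simpler decomposition).

-- ===== PORT A =====
def number_display_graph (numbers : List Int) : List String :=
  let numbers' := if numbers.length > 5 then PySem.List.slice numbers (some 0) (some 5) else numbers
  numbers'.foldl (fun graph n =>
    graph ++ [(PySem.List.pyRange 0 n 1).foldl
      (fun ind i => (if PySem.Int.mod i 5 == 0 && i != 0 then ind ++ " " else ind) ++ "*")
      (PySem.Int.toStr n ++ "  :")]) []

-- ===== PORT B =====
-- the while loop of Source B's _bar: peel a "*****" chunk while n > 5, then the remainder chunk
def ndg_barLoop (n : Int) (parts : List String) : List String :=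
  if 5 < n then ndg_barLoop (n - 5) (parts ++ ["*****"])
  else parts ++ [String.ofList (List.replicate n.toNat '*')]
termination_by n.toNat
decreasing_by omega

def ndg_bar (n : Int) : String := PySem.Str.join " " (ndg_barLoop n [])

def number_display_graph_alt (numbers : List Int) : List String :=
  (PySem.List.slice numbers none (some 5)).map
    (fun n => PySem.Int.toStr n ++ "  :" ++ ndg_bar n)

-- ===== PRECONDITION & SPEC =====
def Spec_number_display_graph (numbers : List Int) (out : List String) : Prop := out = number_display_graph_alt numbers
instance (numbers : List Int) (out : List String) : Decidable (Spec_number_display_graph numbers out) := by unfold Spec_number_display_graph; infer_instance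

-- ===== CLAIM (what is proved, stated in full; the proofs are below) =====
def Claim_equal_number_display_graph : Prop := ∀ (numbers : List Int), Dom_number_display_graph numbers → Spec_number_display_graph numbers (number_display_graph numbers)

-- ===== LEMMAS AND PROOFS =====

-- the character content of a bar of m stars, chunked from the front
def barChars (m : Nat) : List Char :=
  if 5 < m then List.replicate 5 '*' ++ ' ' :: barChars (m - 5) else List.replicate m '*'
termination_by m
decreasing_by omega

theorem barChars_of_gt {m : Nat} (h : 5 < m) :
    barChars m = List.replicate 5 '*' ++ ' ' :: barChars (m - 5) := by
  rw [barChars, if_pos h]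

theorem barChars_of_le {m : Nat} (h : ¬ 5 < m) : barChars m = List.replicate m '*' := by
  rw [barChars, if_neg h]

theorem barLoop_of_gt {n : Int} (h : 5 < n) (parts : List String) :
    ndg_barLoop n parts = ndg_barLoop (n - 5) (parts ++ ["*****"]) := by
  rw [ndg_barLoop, if_pos h]

theorem barLoop_of_le {n : Int} (h : ¬ 5 < n) (parts : List String) :
    ndg_barLoop n parts = parts ++ [String.ofList (List.replicate n.toNat '*')] := by
  rw [ndg_barLoop, if_neg h]

theorem barLoop_acc (n : Int) (parts : List String) :
    ndg_barLoop n parts = parts ++ ndg_barLoop n [] := by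
  by_cases h : 5 < n
  · rw [barLoop_of_gt h, barLoop_of_gt h, barLoop_acc (n - 5) (parts ++ ["*****"]),
      barLoop_acc (n - 5) ([] ++ ["*****"])]
    simp
  · rw [barLoop_of_le h, barLoop_of_le h]
    simp
termination_by n.toNat
decreasing_by all_goals omega

theorem barLoop_ne_nil (n : Int) : ndg_barLoop n [] ≠ [] := by
  by_cases h : 5 < n
  · rw [barLoop_of_gt h, barLoop_acc]; simp
  · rw [barLoop_of_le h]; simp

theorem bar_toList (n : Int) : (ndg_bar n).toList = barChars n.toNat := by
  by_cases h : 5 < n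
  · obtain ⟨q, rest, hq⟩ := List.exists_cons_of_ne_nil (barLoop_ne_nil (n - 5))
    unfold ndg_bar
    rw [barLoop_of_gt h, barLoop_acc, hq]
    rw [PySem.Str.toList_join]
    simp only [List.map_cons, List.map, List.nil_append, List.singleton_append]
    rw [PySem.Chars.join_cons_cons]
    have hrec : PySem.Chars.join " ".toList (q.toList :: rest.map String.toList)
        = (ndg_bar (n - 5)).toList := by
      unfold ndg_bar
      rw [hq, PySem.Str.toList_join]; simp
    rw [hrec, bar_toList (n - 5), barChars_of_gt (by omega : 5 < n.toNat)]
    have h5 : (n - 5).toNat = n.toNat - 5 := by omega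
    rw [h5]
    simp
  · unfold ndg_bar
    rw [barLoop_of_le h, PySem.Str.toList_join]
    simp only [List.nil_append, List.map_cons, List.map_nil]
    rw [PySem.Chars.join_singleton, barChars_of_le (by omega : ¬ 5 < n.toNat)]
    simp
termination_by n.toNat
decreasing_by omega

theorem barChars_succ (m : Nat) :
    barChars (m + 1) = barChars m ++ (if m % 5 = 0 ∧ m ≠ 0 then [' ', '*'] else ['*']) := by
  induction m using Nat.strong_induction_on with
  | _ m ih =>
    by_cases h5 : 5 < m + 1
    · rcases Nat.lt_or_ge 5 m with hm | hm
      · -- m > 5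
        rw [barChars_of_gt h5, barChars_of_gt hm]
        have h1 : m + 1 - 5 = (m - 5) + 1 := by omega
        rw [h1, ih (m - 5) (by omega)]
        have hcond : ((m - 5) % 5 = 0 ∧ m - 5 ≠ 0) = (m % 5 = 0 ∧ m ≠ 0) := by
          apply propext
          constructor <;> (intro hx; exact ⟨by omega, by omega⟩)
        simp only [hcond]
        simp
      · -- m = 5 exactly
        have hm5 : m = 5 := by omega
        subst hm5
        rw [barChars_of_gt h5, barChars_of_le (by omega), barChars_of_le (by omega),
          if_pos (by omega : 5 % 5 = 0 ∧ 5 ≠ 0)]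
        decide
    · -- m + 1 ≤ 5
      rw [barChars_of_le h5, barChars_of_le (by omega : ¬ 5 < m),
        if_neg (by omega : ¬ (m % 5 = 0 ∧ m ≠ 0))]
      exact List.replicate_succ'

theorem foldA_toList (m : Nat) (s : String) :
    ((PySem.List.pyRange 0 (m : Int) 1).foldl
      (fun ind i => (if PySem.Int.mod i 5 == 0 && i != 0 then ind ++ " " else ind) ++ "*") s).toList
    = s.toList ++ barChars m := by
  induction m generalizing s with
  | zero =>
      rw [barChars_of_le (by omega)]
      simp
  | succ k ih =>
      have hstep : ((k + 1 : Nat) : Int) = ((k : Int) + 1) := by push_cast; ring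
      rw [hstep, PySem.List.pyRange_one_succ_right (by positivity : (0:Int) ≤ (k : Int))]
      rw [List.foldl_append]
      simp only [List.foldl_cons, List.foldl_nil]
      rw [barChars_succ]
      by_cases hc : k % 5 = 0 ∧ k ≠ 0
      · have hb : (PySem.Int.mod (k : Int) 5 == 0 && (k : Int) != 0) = true := by
          simp [hc.2]
          omega
        rw [hb, if_pos rfl]
        rw [String.toList_append, String.toList_append, ih]
        simp [hc]
      · have hb : (PySem.Int.mod (k : Int) 5 == 0 && (k : Int) != 0) = false := by
          simp
          omega
        rw [hb, if_neg (by simp)]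
        rw [String.toList_append, ih]
        simp [hc]

theorem foldl_app_singleton (f : Int → String) (l : List Int) (acc : List String) :
    l.foldl (fun g n => g ++ [f n]) acc = acc ++ l.map f := by
  induction l generalizing acc with
  | nil => simp
  | cons x xs ih => simp [ih]

theorem inner_eq (n : Int) :
    (PySem.List.pyRange 0 n 1).foldl
      (fun ind i => (if PySem.Int.mod i 5 == 0 && i != 0 then ind ++ " " else ind) ++ "*")
      (PySem.Int.toStr n ++ "  :")
    = PySem.Int.toStr n ++ "  :" ++ ndg_bar n := by
  apply String.ext
  have hr : PySem.List.pyRange 0 n 1 = PySem.List.pyRange 0 (n.toNat : Int) 1 := by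
    rw [PySem.List.pyRange_one, PySem.List.pyRange_one]
    congr 2
    omega
  rw [hr, foldA_toList]
  simp [bar_toList]

theorem take5_eq (numbers : List Int) :
    (if numbers.length > 5 then PySem.List.slice numbers (some 0) (some 5) else numbers)
    = numbers.take 5 := by
  split
  · rw [PySem.List.slice_zero_start, PySem.List.slice_to _ (by omega : (0:Int) ≤ 5)]
    rfl
  · rw [List.take_of_length_le (by omega)]

-- ===== VERDICT (by name: the statement is the Claim_ definition above) =====
theorem number_display_graph_spec : Claim_equal_number_display_graph := by
  intro numbers _
  unfold Spec_number_display_graph number_display_graph number_display_graph_alt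
  rw [take5_eq, PySem.List.slice_to _ (by omega : (0:Int) ≤ 5)]
  rw [foldl_app_singleton]
  simp only [List.nil_append]
  apply List.map_congr_left
  intro n _
  exact inner_eq n
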